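-- pv_equiv track=rewrite | github.com/Reza-HZ/Ancestra | Ancestra_V1.py | _match_hotspot
-- ===== SOURCE A (Python) =====
-- IUPAC_CODES = {
--     'A': {'a'}, 'C': {'c'}, 'G': {'g'}, 'T': {'t'},
--     'R': {'a', 'g'}, 'Y': {'c', 't'}, 'W': {'a', 't'},
--     'S': {'g', 'c'}, 'K': {'g', 't'}, 'M': {'a', 'c'},
--     'B': {'c', 'g', 't'}, 'D': {'a', 'g', 't'}, 'H': {'a', 'c', 't'},
--     'V': {'a', 'c', 'g'}, 'N': {'a', 'c', 'g', 't'}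
-- }
--
-- def _match_hotspot(sequence, hotspot_pattern):
--     if len(sequence) != len(hotspot_pattern):
--         return False
--
--     for base, code in zip(sequence, hotspot_pattern):
--         valid_bases = IUPAC_CODES.get(code, {code})
--         if base not in valid_bases:
--             return False
--     return True
-- ===== SOURCE B (Python) =====
-- # Regex re-implementation: compile the hotspot pattern once into a regular
-- # expression (a character class per IUPAC code, an escaped literal otherwise)
-- # and decide the whole match with re.fullmatch, which also subsumes the
-- # length check.
-- import re
--
-- IUPAC_CODES = {
--     'A': {'a'}, 'C': {'c'}, 'G': {'g'}, 'T': {'t'},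
--     'R': {'a', 'g'}, 'Y': {'c', 't'}, 'W': {'a', 't'},
--     'S': {'g', 'c'}, 'K': {'g', 't'}, 'M': {'a', 'c'},
--     'B': {'c', 'g', 't'}, 'D': {'a', 'g', 't'}, 'H': {'a', 'c', 't'},
--     'V': {'a', 'c', 'g'}, 'N': {'a', 'c', 'g', 't'}
-- }
--
-- def _match_hotspot(sequence, hotspot_pattern):
--     parts = []
--     for code in hotspot_pattern:
--         if code in IUPAC_CODES:
--             parts.append('[' + ''.join(sorted(IUPAC_CODES[code])) + ']')
--         else:
--             parts.append(re.escape(code))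
--     return re.fullmatch(''.join(parts), sequence) is not None
-- ===== Notes on version B (the rewrite author's own statement) =====
-- stated objective: idiomatic
-- what changed: B compiles the hotspot pattern once into a regular expression (a character class of the sorted allowed bases per IUPAC code, an escaped literal for other characters) and decides the whole match with re.fullmatch, which subsumes A's explicit length check and per-position set-membership loop.
import Mathlib
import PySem

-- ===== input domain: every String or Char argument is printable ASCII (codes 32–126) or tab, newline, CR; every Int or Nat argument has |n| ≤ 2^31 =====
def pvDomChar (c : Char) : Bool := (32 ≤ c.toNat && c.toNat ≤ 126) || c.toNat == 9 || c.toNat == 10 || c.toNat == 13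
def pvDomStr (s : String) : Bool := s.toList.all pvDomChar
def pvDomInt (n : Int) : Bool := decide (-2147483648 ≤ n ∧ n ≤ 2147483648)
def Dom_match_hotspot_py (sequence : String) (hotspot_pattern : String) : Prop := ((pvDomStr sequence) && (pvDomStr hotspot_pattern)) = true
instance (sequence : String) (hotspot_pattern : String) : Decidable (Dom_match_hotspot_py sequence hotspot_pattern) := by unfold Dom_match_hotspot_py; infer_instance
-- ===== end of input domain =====

set_option maxRecDepth 10000


-- B compiles the hotspot pattern into a regular expression (a character class per
-- IUPAC code, an escaped literal otherwise) and decides the whole match with a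
-- fullmatch over that pattern (idiomatic; the length check is subsumed).

-- ===== PORT A =====
-- IUPAC_CODES: dict of char -> set of chars
def iupacCodes : PySem.Dict Char (PySem.Set Char) := PySem.Dict.ofList
  [('A', PySem.Set.ofList ['a']), ('C', PySem.Set.ofList ['c']),
   ('G', PySem.Set.ofList ['g']), ('T', PySem.Set.ofList ['t']),
   ('R', PySem.Set.ofList ['a', 'g']), ('Y', PySem.Set.ofList ['c', 't']),
   ('W', PySem.Set.ofList ['a', 't']), ('S', PySem.Set.ofList ['g', 'c']),
   ('K', PySem.Set.ofList ['g', 't']), ('M', PySem.Set.ofList ['a', 'c']),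
   ('B', PySem.Set.ofList ['c', 'g', 't']), ('D', PySem.Set.ofList ['a', 'g', 't']),
   ('H', PySem.Set.ofList ['a', 'c', 't']), ('V', PySem.Set.ofList ['a', 'c', 'g']),
   ('N', PySem.Set.ofList ['a', 'c', 'g', 't'])]

-- the 'for base, code in zip(...)' loop with its early 'return False'
def matchLoopA : List (Char × Char) → Bool
  | [] => true
  | (base, code) :: rest =>
    let validBases := iupacCodes.getD code (PySem.Set.ofList [code])
    if ¬ (PySem.Set.contains validBases base) then false
    else matchLoopA rest

def match_hotspot_py (sequence : String) (hotspot_pattern : String) : Bool :=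
  if PySem.Str.len sequence ≠ PySem.Str.len hotspot_pattern then false
  else matchLoopA (sequence.toList.zip hotspot_pattern.toList)

-- ===== PORT B =====
-- Source B's own copy of IUPAC_CODES
def iupacCodesB : PySem.Dict Char (PySem.Set Char) := PySem.Dict.ofList
  [('A', PySem.Set.ofList ['a']), ('C', PySem.Set.ofList ['c']),
   ('G', PySem.Set.ofList ['g']), ('T', PySem.Set.ofList ['t']),
   ('R', PySem.Set.ofList ['a', 'g']), ('Y', PySem.Set.ofList ['c', 't']),
   ('W', PySem.Set.ofList ['a', 't']), ('S', PySem.Set.ofList ['g', 'c']),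
   ('K', PySem.Set.ofList ['g', 't']), ('M', PySem.Set.ofList ['a', 'c']),
   ('B', PySem.Set.ofList ['c', 'g', 't']), ('D', PySem.Set.ofList ['a', 'g', 't']),
   ('H', PySem.Set.ofList ['a', 'c', 't']), ('V', PySem.Set.ofList ['a', 'c', 'g']),
   ('N', PySem.Set.ofList ['a', 'c', 'g', 't'])]

-- re.escape, hand-ported: exact on the ASCII domain (CPython escapes exactly the
-- characters of its _special_chars_map, i.e. '()[]{}?*+-|^$\.&~# ' and codes 9–13,
-- each to backslash + the character itself).
def reEscapeChar (c : Char) : List Char :=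
  if c ∈ ([' ', '#', '$', '&', '(', ')', '*', '+', '-', '.', '?', '[', '\\', ']',
           '^', '{', '|', '}', '~', '\t', '\n', '\r',
           Char.ofNat 11, Char.ofNat 12] : List Char)
  then ['\\', c] else [c]

-- one iteration of Source B's parts-building loop: '[' ++ sorted members ++ ']', or the escaped literal
def tokFor (code : Char) : List Char :=
  if iupacCodesB.contains code then
    '[' :: (PySem.List.sorted (iupacCodesB.getD code PySem.Set.empty) (fun x => x) false) ++ [']']
  else reEscapeChar code

-- ''.join(parts): the compiled regex, as a character list
def buildPattern (pat : List Char) : List Char := pat.flatMap tokFor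

-- re.fullmatch, hand-ported: exact for the regex language buildPattern emits —
-- a concatenation of character classes '[…]' (no ']' inside a class) and
-- single literal characters, optionally backslash-escaped.
def matchRun (p : List Char) (s : List Char) : Bool :=
  match p with
  | [] => s.isEmpty
  | c :: rest =>
    if c = '[' then
      let cls := rest.takeWhile (fun x => x ≠ ']')
      let rest' := (rest.dropWhile (fun x => x ≠ ']')).drop 1
      match s with
      | [] => false
      | b :: bs => cls.contains b && matchRun rest' bs
    else if c = '\\' then
      match rest, s with
      | [], _ => false
      | _ :: _, [] => false
      | l :: rest', b :: bs => (b == l) && matchRun rest' bs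
    else
      match s with
      | [] => false
      | b :: bs => (b == c) && matchRun rest bs
termination_by p.length
decreasing_by
  · have h1 : (rest.dropWhile (fun x => x ≠ ']')).length ≤ rest.length :=
      List.length_dropWhile_le _ _
    simp only [List.length_drop, List.length_cons]
    omega
  · simp only [List.length_cons]; omega
  · simp only [List.length_cons]; omega

def match_hotspot_py_alt (sequence : String) (hotspot_pattern : String) : Bool :=
  matchRun (buildPattern hotspot_pattern.toList) sequence.toList

-- ===== PRECONDITION & SPEC =====
def Spec_match_hotspot_py (sequence : String) (hotspot_pattern : String) (out : Bool) : Prop := out = match_hotspot_py_alt sequence hotspot_pattern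
instance (sequence : String) (hotspot_pattern : String) (out : Bool) : Decidable (Spec_match_hotspot_py sequence hotspot_pattern out) := by unfold Spec_match_hotspot_py; infer_instance

-- ===== CLAIM (what is proved, stated in full; the proofs are below) =====
def Claim_equal_match_hotspot_py : Prop := ∀ (sequence : String) (hotspot_pattern : String), Dom_match_hotspot_py sequence hotspot_pattern → Spec_match_hotspot_py sequence hotspot_pattern (match_hotspot_py sequence hotspot_pattern)

-- ===== LEMMAS AND PROOFS =====

-- A's per-position test
def okA (b c : Char) : Bool := PySem.Set.contains (iupacCodes.getD c (PySem.Set.ofList [c])) b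

theorem matchLoopA_cons (b c : Char) (rest : List (Char × Char)) :
    matchLoopA ((b, c) :: rest) = (okA b c && matchLoopA rest) := by
  simp only [matchLoopA, okA]
  cases h : PySem.Set.contains (iupacCodes.getD c (PySem.Set.ofList [c])) b <;> simp

-- the key step: one compiled token consumes exactly one character, with A's test
theorem takeWhile_class (cls rest : List Char) (h : ']' ∉ cls) :
    (cls ++ ']' :: rest).takeWhile (fun x => !decide (x = ']')) = cls := by
  induction cls with
  | nil => rw [List.nil_append, List.takeWhile_cons_of_neg (by simp)]
  | cons a t ih =>
    have h1 : a ≠ ']' := by intro he; exact h (by simp [he])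
    have h2 : ']' ∉ t := fun hm => h (by simp [hm])
    rw [List.cons_append, List.takeWhile_cons_of_pos (by simp [h1]), ih h2]

theorem dropWhile_class (cls rest : List Char) (h : ']' ∉ cls) :
    (cls ++ ']' :: rest).dropWhile (fun x => !decide (x = ']')) = ']' :: rest := by
  induction cls with
  | nil => rw [List.nil_append, List.dropWhile_cons_of_neg (by simp)]
  | cons a t ih =>
    have h1 : a ≠ ']' := by intro he; exact h (by simp [he])
    have h2 : ']' ∉ t := fun hm => h (by simp [hm])
    rw [List.cons_append, List.dropWhile_cons_of_pos (by simp [h1]), ih h2]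

theorem matchRun_class (cls : List Char) (h : ']' ∉ cls) (rest s : List Char) :
    matchRun ('[' :: (cls ++ ']' :: rest)) s =
      (match s with
       | [] => false
       | b :: bs => cls.contains b && matchRun rest bs) := by
  rw [matchRun.eq_def]
  simp
  simp only [takeWhile_class cls rest h, dropWhile_class cls rest h, List.tail_cons]

theorem matchRun_esc (l : Char) (rest s : List Char) :
    matchRun ('\\' :: l :: rest) s =
      (match s with
       | [] => false
       | b :: bs => (b == l) && matchRun rest bs) := by
  rw [matchRun.eq_def]
  simp
  cases s <;> rfl

theorem matchRun_lit (c : Char) (rest s : List Char) (h1 : c ≠ '[') (h2 : c ≠ '\\') :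
    matchRun (c :: rest) s =
      (match s with
       | [] => false
       | b :: bs => (b == c) && matchRun rest bs) := by
  rw [matchRun.eq_def]
  simp [h1, h2]

theorem iupacCodes_mk : iupacCodes = PySem.Dict.mk
  [('A', ['a']), ('C', ['c']), ('G', ['g']), ('T', ['t']), ('R', ['a', 'g']), ('Y', ['c', 't']),
   ('W', ['a', 't']), ('S', ['g', 'c']), ('K', ['g', 't']), ('M', ['a', 'c']),
   ('B', ['c', 'g', 't']), ('D', ['a', 'g', 't']), ('H', ['a', 'c', 't']), ('V', ['a', 'c', 'g']),
   ('N', ['a', 'c', 'g', 't'])] := by decide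

theorem okA_known (c : Char) (cls ws : List Char)
    (hget : iupacCodes.getD c (PySem.Set.ofList [c]) = ws)
    (hmem : ∀ x, x ∈ ws ↔ x ∈ cls) (b : Char) :
    okA b c = cls.contains b := by
  by_cases hb : b ∈ cls
  · simp [okA, hget, (hmem b).mpr hb, hb]
  · have hw : b ∉ ws := fun hw => hb ((hmem b).mp hw)
    simp [okA, hget, hw, hb]

theorem okA_unknown (b c : Char) (h : iupacCodes.get? c = none) : okA b c = (b == c) := by
  simp [okA, PySem.Dict.getD_eq_get?_getD, h, PySem.Set.ofList, PySem.Set.add,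
        Bool.beq_eq_decide_eq]

theorem step_known (c : Char) (cls : List Char) (hcl : ']' ∉ cls)
    (htok : tokFor c = '[' :: cls ++ [']'])
    (hok : ∀ b, okA b c = cls.contains b) (rest s : List Char) :
    matchRun (tokFor c ++ rest) s =
      (match s with
       | [] => false
       | b :: bs => okA b c && matchRun rest bs) := by
  rw [htok]
  have he : ('[' :: cls ++ [']']) ++ rest = '[' :: (cls ++ ']' :: rest) := by simp
  rw [he, matchRun_class cls hcl rest s]
  cases s with
  | nil => rfl
  | cons b bs => simp [hok b]

theorem step_eq (c : Char) (rest : List Char) (s : List Char) :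
    matchRun (tokFor c ++ rest) s =
      (match s with
       | [] => false
       | b :: bs => okA b c && matchRun rest bs) := by
  by_cases hc : c ∈ (['A', 'C', 'G', 'T', 'R', 'Y', 'W', 'S', 'K', 'M', 'B', 'D', 'H', 'V', 'N'] : List Char)
  · fin_cases hc
    · exact step_known _ ['a'] (by decide) (by decide)
        (okA_known _ ['a'] ['a'] (by decide) (fun _ => Iff.rfl)) rest s
    · exact step_known _ ['c'] (by decide) (by decide)
        (okA_known _ ['c'] ['c'] (by decide) (fun _ => Iff.rfl)) rest s
    · exact step_known _ ['g'] (by decide) (by decide)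
        (okA_known _ ['g'] ['g'] (by decide) (fun _ => Iff.rfl)) rest s
    · exact step_known _ ['t'] (by decide) (by decide)
        (okA_known _ ['t'] ['t'] (by decide) (fun _ => Iff.rfl)) rest s
    · exact step_known _ ['a', 'g'] (by decide) (by decide)
        (okA_known _ ['a', 'g'] ['a', 'g'] (by decide) (fun _ => Iff.rfl)) rest s
    · exact step_known _ ['c', 't'] (by decide) (by decide)
        (okA_known _ ['c', 't'] ['c', 't'] (by decide) (fun _ => Iff.rfl)) rest s
    · exact step_known _ ['a', 't'] (by decide) (by decide)
        (okA_known _ ['a', 't'] ['a', 't'] (by decide) (fun _ => Iff.rfl)) rest s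
    · exact step_known _ ['c', 'g'] (by decide) (by decide)
        (okA_known _ ['c', 'g'] ['g', 'c'] (by decide) (fun x => by simp [List.mem_cons, or_comm])) rest s
    · exact step_known _ ['g', 't'] (by decide) (by decide)
        (okA_known _ ['g', 't'] ['g', 't'] (by decide) (fun _ => Iff.rfl)) rest s
    · exact step_known _ ['a', 'c'] (by decide) (by decide)
        (okA_known _ ['a', 'c'] ['a', 'c'] (by decide) (fun _ => Iff.rfl)) rest s
    · exact step_known _ ['c', 'g', 't'] (by decide) (by decide)
        (okA_known _ ['c', 'g', 't'] ['c', 'g', 't'] (by decide) (fun _ => Iff.rfl)) rest s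
    · exact step_known _ ['a', 'g', 't'] (by decide) (by decide)
        (okA_known _ ['a', 'g', 't'] ['a', 'g', 't'] (by decide) (fun _ => Iff.rfl)) rest s
    · exact step_known _ ['a', 'c', 't'] (by decide) (by decide)
        (okA_known _ ['a', 'c', 't'] ['a', 'c', 't'] (by decide) (fun _ => Iff.rfl)) rest s
    · exact step_known _ ['a', 'c', 'g'] (by decide) (by decide)
        (okA_known _ ['a', 'c', 'g'] ['a', 'c', 'g'] (by decide) (fun _ => Iff.rfl)) rest s
    · exact step_known _ ['a', 'c', 'g', 't'] (by decide) (by decide)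
        (okA_known _ ['a', 'c', 'g', 't'] ['a', 'c', 'g', 't'] (by decide) (fun _ => Iff.rfl)) rest s
  · simp only [List.mem_cons, List.not_mem_nil, or_false] at hc
    push Not at hc
    obtain ⟨n1, n2, n3, n4, n5, n6, n7, n8, n9, n10, n11, n12, n13, n14, n15⟩ := hc
    have hgn : iupacCodes.get? c = none := by
      rw [iupacCodes_mk]
      simp [PySem.Dict.get?, Ne.symm n1, Ne.symm n2, Ne.symm n3,
            Ne.symm n4, Ne.symm n5, Ne.symm n6, Ne.symm n7, Ne.symm n8, Ne.symm n9,
            Ne.symm n10, Ne.symm n11, Ne.symm n12, Ne.symm n13, Ne.symm n14, Ne.symm n15]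
    have hgnB : iupacCodesB.contains c = false := by
      have : iupacCodesB = iupacCodes := by decide
      rw [this, PySem.Dict.contains_eq_isSome_get?, hgn]; rfl
    have htok : tokFor c = reEscapeChar c := by simp [tokFor, hgnB]
    rw [htok]
    by_cases hsp : c ∈ ([' ', '#', '$', '&', '(', ')', '*', '+', '-', '.', '?', '[', '\\', ']',
           '^', '{', '|', '}', '~', '\t', '\n', '\r',
           Char.ofNat 11, Char.ofNat 12] : List Char)
    · have he : reEscapeChar c = ['\\', c] := by simp [reEscapeChar, hsp]
      rw [he]
      have : (['\\', c] : List Char) ++ rest = '\\' :: c :: rest := rfl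
      rw [this, matchRun_esc]
      cases s with
      | nil => rfl
      | cons b bs => simp [okA_unknown b c hgn]
    · have he : reEscapeChar c = [c] := by simp [reEscapeChar, hsp]
      rw [he]
      have h1 : c ≠ '[' := fun hce => hsp (by rw [hce]; decide)
      have h2 : c ≠ '\\' := fun hce => hsp (by rw [hce]; decide)
      have : ([c] : List Char) ++ rest = c :: rest := rfl
      rw [this, matchRun_lit c rest s h1 h2]
      cases s with
      | nil => rfl
      | cons b bs => simp [okA_unknown b c hgn]

theorem main_eq (pat : List Char) (s : List Char) :
    matchRun (buildPattern pat) s =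
      (decide (s.length = pat.length) && matchLoopA (s.zip pat)) := by
  induction pat generalizing s with
  | nil =>
    cases s <;> simp [buildPattern, matchRun, matchLoopA]
  | cons c pat' ih =>
    have hb : buildPattern (c :: pat') = tokFor c ++ buildPattern pat' := by
      simp [buildPattern]
    rw [hb, step_eq]
    cases s with
    | nil => simp
    | cons b bs =>
      simp only [ih, List.zip_cons_cons, matchLoopA_cons, List.length_cons,
        Nat.add_right_cancel_iff]
      rw [Bool.and_left_comm]

-- ===== VERDICT (by name: the statement is the Claim_ definition above) =====
theorem match_hotspot_py_spec : Claim_equal_match_hotspot_py := by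
  intro s p _
  unfold Spec_match_hotspot_py match_hotspot_py match_hotspot_py_alt
  rw [main_eq]
  by_cases h : PySem.Str.len s = PySem.Str.len p
  · have hl : s.toList.length = p.toList.length := by
      simpa [PySem.Str.len] using h
    simp [hl]
  · have hl : s.toList.length ≠ p.toList.length := by
      intro he; apply h; simp [PySem.Str.len, he]
    simp [hl]
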